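-- pv_equiv track=rewrite | github.com/bibiksh/Python_trainging | 2.Python_basic/Chapter03/Problem28.py | count
-- ===== SOURCE A (Python) =====
-- def count(num):
--     count=0
--     counteven=0
--     for i in num:
--
--         # i.isalpaha  i.isdigit
--         if i in "0123456789":
--             count+=1
--             if int(i)%2==0:
--                 counteven+=1
--     return count,counteven
-- ===== SOURCE B (Python) =====
-- def count(num):
--     freq = {}
--     for ch in num:
--         freq[ch] = freq.get(ch, 0) + 1
--     c = 0
--     for d in "0123456789":
--         c += freq.get(d, 0)
--     ce = 0
--     for d in "02468":
--         ce += freq.get(d, 0)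
--     return c, ce
-- ===== Notes on version B (the rewrite author's own statement) =====
-- stated objective: alternative
-- what changed: B first builds a character-frequency table in one pass over the string, then accumulates the two tallies by iterating over the fixed ten-digit and five-even-digit alphabets, instead of A's single interleaved scan that tests each character's parity in place.
import Mathlib
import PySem

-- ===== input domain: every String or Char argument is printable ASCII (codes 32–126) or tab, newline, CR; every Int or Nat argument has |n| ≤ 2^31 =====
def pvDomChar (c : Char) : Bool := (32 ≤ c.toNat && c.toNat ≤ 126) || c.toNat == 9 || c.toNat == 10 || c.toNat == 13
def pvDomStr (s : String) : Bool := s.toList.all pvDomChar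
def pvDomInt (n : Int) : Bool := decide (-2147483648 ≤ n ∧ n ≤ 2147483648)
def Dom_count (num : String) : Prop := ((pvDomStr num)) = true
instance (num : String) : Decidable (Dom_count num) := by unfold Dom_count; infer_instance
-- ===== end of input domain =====

-- B builds a character-frequency table in one pass, then sums it over the fixed digit alphabets; alternative decomposition, same cost.

-- ===== PORT A =====
-- A: one interleaved scan of num, testing membership in "0123456789" and int(i) % 2 == 0.
def countStepA (st : Int × Int) (i : Char) : Int × Int :=
  if ("0123456789".toList.contains i) then
    let st' := (st.1 + 1, st.2)
    match PySem.Int.ofStr? (String.mk [i]) with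
    | some v => if PySem.Int.mod v 2 == 0 then (st'.1, st'.2 + 1) else st'
    | none => st'   -- unreachable: i is a digit character here
  else st

def count (num : String) : Int × Int :=
  num.toList.foldl countStepA (0, 0)

-- ===== PORT B =====
def count_alt (num : String) : Int × Int :=
  let freq := num.toList.foldl (fun d ch => d.insert ch (d.getD ch 0 + 1))
                (PySem.Dict.empty : PySem.Dict Char Int)
  let c := "0123456789".toList.foldl (fun acc d => acc + freq.getD d 0) (0 : Int)
  let ce := "02468".toList.foldl (fun acc d => acc + freq.getD d 0) (0 : Int)
  (c, ce)

-- ===== PRECONDITION & SPEC =====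
def Spec_count (num : String) (out : Int × Int) : Prop := out = count_alt num
instance (num : String) (out : Int × Int) : Decidable (Spec_count num out) := by unfold Spec_count; infer_instance

-- ===== CLAIM (what is proved, stated in full; the proofs are below) =====
def Claim_equal_count : Prop := ∀ (num : String), Dom_count num → Spec_count num (count num)

-- ===== LEMMAS AND PROOFS =====

-- A's step shifts the accumulator: the increment depends only on the character.
theorem countStepA_shift (st : Int × Int) (c : Char) :
    countStepA st c = (st.1 + (countStepA (0, 0) c).1, st.2 + (countStepA (0, 0) c).2) := by
  unfold countStepA
  by_cases h1 : ("0123456789".toList.contains c) = true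
  · rw [if_pos h1, if_pos h1]
    cases h : PySem.Int.ofStr? (String.mk [c]) with
    | none => simp
    | some v => by_cases h2 : (2:Int) ∣ v <;> simp [h2]
  · rw [if_neg h1, if_neg h1]
    simp

-- The per-character increment: 1 for a digit, and 1 more for an even digit.
theorem countStepA_zero (c : Char) :
    countStepA (0, 0) c =
      ((if ("0123456789".toList.contains c) then (1 : Int) else 0),
       (if ("02468".toList.contains c) then (1 : Int) else 0)) := by
  by_cases h1 : ("0123456789".toList.contains c) = true
  · have hm : c = '0' ∨ c = '1' ∨ c = '2' ∨ c = '3' ∨ c = '4' ∨ c = '5' ∨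
        c = '6' ∨ c = '7' ∨ c = '8' ∨ c = '9' := by
      simpa using h1
    rcases hm with h|h|h|h|h|h|h|h|h|h <;> subst h <;> decide
  · have h2 : ¬ (("02468".toList.contains c) = true) := by
      simp at h1 ⊢
      tauto
    rw [if_neg h1, if_neg h2]
    unfold countStepA
    rw [if_neg h1]

theorem countStepA_eq (st : Int × Int) (c : Char) :
    countStepA st c =
      (st.1 + (if ("0123456789".toList.contains c) then (1 : Int) else 0),
       st.2 + (if ("02468".toList.contains c) then (1 : Int) else 0)) := by
  rw [countStepA_shift, countStepA_zero]

theorem foldl_countStepA (l : List Char) (a b : Int) :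
    l.foldl countStepA (a, b) =
      (a + (l.countP (fun c => "0123456789".toList.contains c) : Int),
       b + (l.countP (fun c => "02468".toList.contains c) : Int)) := by
  induction l generalizing a b with
  | nil => simp
  | cons x xs ih =>
      simp only [List.foldl_cons, countStepA_eq, ih, List.countP_cons, Prod.mk.injEq]
      constructor <;> split_ifs <;> push_cast <;> ring

theorem countP_or_split (l : List Char) (d : Char) (ds : List Char) (h : d ∉ ds) :
    l.countP (fun c => c == d || ds.contains c) =
      l.count d + l.countP (fun c => ds.contains c) := by
  induction l with
  | nil => simp
  | cons x xs ih =>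
      simp only [List.countP_cons, List.count_cons, ih]
      by_cases hx : x = d
      · subst hx
        have hds : x ∉ ds := h
        simp [hds] <;> omega
      · by_cases hds : x ∈ ds <;> simp [hx, hds] <;> omega

theorem foldl_sum_count (ds : List Char) (l : List Char) (h : ds.Nodup) (a : Int) :
    ds.foldl (fun acc d => acc + (l.count d : Int)) a =
      a + (l.countP (fun c => ds.contains c) : Int) := by
  induction ds generalizing a with
  | nil => simp
  | cons d ds ih =>
      have hnd : d ∉ ds := (List.nodup_cons.mp h).1
      rw [List.foldl_cons, ih (List.nodup_cons.mp h).2]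
      simp only [List.contains_cons]
      rw [countP_or_split l d ds hnd]
      push_cast
      ring

theorem count_alt_eq (num : String) :
    count_alt num =
      ((num.toList.countP (fun c => "0123456789".toList.contains c) : Int),
       (num.toList.countP (fun c => "02468".toList.contains c) : Int)) := by
  unfold count_alt
  have hfreq : ∀ d : Char,
      (num.toList.foldl (fun d' ch => d'.insert ch (d'.getD ch 0 + 1))
        (PySem.Dict.empty : PySem.Dict Char Int)).getD d 0 = (num.toList.count d : Int) := by
    intro d
    rw [PySem.Dict.getD_foldl_insert_add_one]
    simp
  simp only [hfreq]
  rw [foldl_sum_count _ _ (by decide), foldl_sum_count _ _ (by decide)]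
  simp

-- ===== VERDICT (by name: the statement is the Claim_ definition above) =====
theorem count_spec : Claim_equal_count := by
  intro num _
  unfold Spec_count count
  rw [count_alt_eq, foldl_countStepA]
  simp
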